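-- pv_equiv track=rewrite | github.com/GrulsuitG/ITE_4005 | project2/dt.py | find_minor
-- ===== SOURCE A (Python) =====
-- import math
--
-- def find_minor(classification, count):
--     minor = math.inf
--     result = classification[0]
--     for cnt, target in zip(count, classification):
--         if minor >= cnt:
--             result = target
--             minor = cnt
--     return result
-- ===== SOURCE B (Python) =====
-- def find_minor(classification, count):
--     pairs = list(zip(count, classification))
--     result = classification[0]
--     if pairs:
--         m = min(c for c, _ in pairs)
--         result = next(t for c, t in reversed(pairs) if c == m)
--     return result
-- ===== Notes on version B (the rewrite author's own statement) =====
-- stated objective: alternative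
-- what changed: Replaces A's single stateful fold (running minimum with sentinel math.inf and in-loop result updates) by a two-phase decomposition: compute the minimum count first, then take the target of the last pair attaining it via a reversed search.
import Mathlib
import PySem

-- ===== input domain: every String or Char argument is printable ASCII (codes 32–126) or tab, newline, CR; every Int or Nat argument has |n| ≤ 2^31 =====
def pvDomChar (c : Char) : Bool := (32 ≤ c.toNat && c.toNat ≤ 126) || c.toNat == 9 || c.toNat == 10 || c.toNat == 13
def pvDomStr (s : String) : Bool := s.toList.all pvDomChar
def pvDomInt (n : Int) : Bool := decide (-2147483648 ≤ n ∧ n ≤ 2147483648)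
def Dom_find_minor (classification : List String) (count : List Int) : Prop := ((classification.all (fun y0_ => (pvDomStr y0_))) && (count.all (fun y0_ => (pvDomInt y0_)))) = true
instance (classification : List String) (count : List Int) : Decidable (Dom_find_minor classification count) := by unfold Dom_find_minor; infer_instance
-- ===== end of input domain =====

-- B replaces A's stateful running-minimum fold by a two-phase decomposition: take the
-- minimum count first, then the target of the last pair attaining it; same O(n) cost.

-- ===== PORT A =====
-- A's loop step: minor = math.inf is modelled as `none`; `minor >= cnt` is true when minor is inf.
def pvStepA (s : Option Int × String) (p : Int × String) : Option Int × String :=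
  match s.1 with
  | none => (some p.1, p.2)
  | some m => if m ≥ p.1 then (some p.1, p.2) else s

-- `classification[0]` raises IndexError on []; Pre_ excludes that, so headI is exact on Pre_.
def find_minor (classification : List String) (count : List Int) : String :=
  ((count.zip classification).foldl pvStepA (none, classification.headI)).2

-- ===== PORT B =====
def find_minor_alt (classification : List String) (count : List Int) : String :=
  let pairs := count.zip classification
  let result := classification.headI
  match (pairs.map Prod.fst).min? with
  | none => result
  | some m =>
    match pairs.reverse.find? (fun p => p.1 == m) with
    | some p => p.2
    | none => result

-- ===== PRECONDITION & SPEC =====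
-- Pre_ excludes only classification = [], where both Pythons raise IndexError at classification[0].
def Pre_find_minor (classification : List String) (count : List Int) : Prop := classification ≠ []
instance (classification : List String) (count : List Int) : Decidable (Pre_find_minor classification count) := by unfold Pre_find_minor; infer_instance
def pvWitness_find_minor : List String × List Int := (["a", "b"], [3, 1])
def Spec_find_minor (classification : List String) (count : List Int) (out : String) : Prop := out = find_minor_alt classification count
instance (classification : List String) (count : List Int) (out : String) : Decidable (Spec_find_minor classification count out) := by unfold Spec_find_minor; infer_instance

-- ===== CLAIM (what is proved, stated in full; the proofs are below) =====
def Claim_equal_find_minor : Prop := ∀ (classification : List String) (count : List Int), Dom_find_minor classification count → Pre_find_minor classification count → Spec_find_minor classification count (find_minor classification count)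

-- ===== LEMMAS AND PROOFS =====

theorem pv_min?_snoc (l : List Int) (c : Int) :
    (l ++ [c]).min? = some (match l.min? with | none => c | some m => min m c) := by
  cases l with
  | nil => simp [List.min?]
  | cons x xs =>
    simp only [List.cons_append, List.min?_cons', List.foldl_append, List.foldl_cons,
      List.foldl_nil]

-- Characterisation of A's fold started at minor = inf: the second component is the
-- target of the last pair whose count equals the minimum count (r0 if no pairs).
theorem pv_loopA_eq (ps : List (Int × String)) (r0 : String) :
    ps.foldl pvStepA (none, r0) =
      match (ps.map Prod.fst).min? with
      | none => ((none : Option Int), r0)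
      | some m => (some m,
          match ps.reverse.find? (fun p => p.1 == m) with
          | some p => p.2
          | none => r0) := by
  induction ps using List.reverseRecOn with
  | nil => simp
  | append_singleton l a ih =>
    rw [List.foldl_append, ih]
    cases h : (l.map Prod.fst).min? with
    | none =>
      have hl : l = [] := by
        cases l with
        | nil => rfl
        | cons x xs => simp [List.min?_cons'] at h
      subst hl
      simp [pvStepA]
    | some m =>
      have hsnoc : ((l ++ [a]).map Prod.fst).min? = some (min m a.1) := by
        rw [List.map_append]
        simp only [List.map_cons, List.map_nil]
        rw [pv_min?_snoc, h]
      simp only [hsnoc, List.reverse_append, List.reverse_singleton, List.singleton_append]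
      by_cases hma : m ≥ a.1
      · have hmin : min m a.1 = a.1 := min_eq_right hma
        simp [pvStepA, hma, hmin]
      · have hmin : min m a.1 = m := min_eq_left (le_of_not_ge hma)
        have hne : (a.1 == m) = false := by
          simp only [beq_eq_false_iff_ne, ne_eq]
          intro hEq; exact hma (le_of_eq hEq)
        simp [pvStepA, hma, hmin, hne]

-- ===== VERDICT (by name: the statement is the Claim_ definition above) =====
theorem find_minor_spec : Claim_equal_find_minor := by
  intro classification count _ _
  unfold Spec_find_minor find_minor find_minor_alt
  rw [pv_loopA_eq]
  cases h : ((count.zip classification).map Prod.fst).min? <;> simp [h]
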